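-- pv_equiv track=rewrite | github.com/baptistejeh07-art/finsight-ia | outputs/pptx_writer.py | _infer_exchange
-- ===== SOURCE A (Python) =====
-- _EXCHANGE_MAP = {
--     "NMS": "NASDAQ", "NGM": "NASDAQ", "NCM": "NASDAQ", "NAS": "NASDAQ",
--     "NYQ": "NYSE",   "NYA": "NYSE",
--     "PCX": "NYSE Arca",
--     "XPAR": "Euronext Paris", "PAR": "Euronext Paris", "ENX": "Euronext Paris",
--     "XLON": "London SE",      "LSE": "London SE",       "IOB": "London SE",
--     "XFRA": "Frankfurt",      "FRA": "Frankfurt",        "GER": "Frankfurt",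
--     "XAMS": "Euronext Amsterdam", "AMS": "Euronext Amsterdam",
--     "XBRU": "Euronext Brussels",  "BRU": "Euronext Brussels",
--     "XMIL": "Borsa Italiana",     "MIL": "Borsa Italiana",
--     "XMAD": "BME",                "MCE": "BME",
--     "TDM": "TSX",                 "TSX": "TSX",
-- }
--
-- def _normalize_exchange(ex: str) -> str:
--     if not ex:
--         return ""
--     return _EXCHANGE_MAP.get(ex.upper().strip(), ex)
--
-- _TICKER_SUFFIX_MAP = {
--     ".PA": "Euronext Paris",  ".L": "London SE",   ".DE": "Frankfurt",
--     ".AS": "Euronext Amsterdam", ".BR": "Euronext Brussels",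
--     ".MI": "Borsa Italiana",  ".MC": "BME",         ".SW": "SIX Swiss",
--     ".TO": "TSX",             ".HK": "HKEX",        ".T":  "Tokyo SE",
--     ".AX": "ASX",             ".CO": "Nasdaq Copenhagen",
-- }
--
-- def _infer_exchange(ticker: str, exchange: str) -> str:
--     """Retourne l'exchange normalisé, avec fallback sur le suffixe du ticker."""
--     ex = _normalize_exchange(exchange)
--     if ex:
--         return ex
--     for sfx, exch in _TICKER_SUFFIX_MAP.items():
--         if ticker.upper().endswith(sfx.upper()):
--             return exch
--     return ""
-- ===== SOURCE B (Python) =====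
-- def _exchange_full_name(code):
--     if code in ("NMS", "NGM", "NCM", "NAS"): return "NASDAQ"
--     if code in ("NYQ", "NYA"): return "NYSE"
--     if code == "PCX": return "NYSE Arca"
--     if code in ("XPAR", "PAR", "ENX"): return "Euronext Paris"
--     if code in ("XLON", "LSE", "IOB"): return "London SE"
--     if code in ("XFRA", "FRA", "GER"): return "Frankfurt"
--     if code in ("XAMS", "AMS"): return "Euronext Amsterdam"
--     if code in ("XBRU", "BRU"): return "Euronext Brussels"
--     if code in ("XMIL", "MIL"): return "Borsa Italiana"
--     if code in ("XMAD", "MCE"): return "BME"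
--     if code in ("TDM", "TSX"): return "TSX"
--     return None
--
-- def _suffix_exchange(seg):
--     if seg == "PA": return "Euronext Paris"
--     if seg == "L": return "London SE"
--     if seg == "DE": return "Frankfurt"
--     if seg == "AS": return "Euronext Amsterdam"
--     if seg == "BR": return "Euronext Brussels"
--     if seg == "MI": return "Borsa Italiana"
--     if seg == "MC": return "BME"
--     if seg == "SW": return "SIX Swiss"
--     if seg == "TO": return "TSX"
--     if seg == "HK": return "HKEX"
--     if seg == "T": return "Tokyo SE"
--     if seg == "AX": return "ASX"
--     if seg == "CO": return "Nasdaq Copenhagen"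
--     return ""
--
-- def _infer_exchange(ticker, exchange):
--     """Normalized exchange; fallback decides by the ticker's last dotted segment."""
--     if exchange:
--         full = _exchange_full_name(exchange.upper().strip())
--         return full if full is not None else exchange
--     _, dot, seg = ticker.upper().rpartition('.')
--     return _suffix_exchange(seg) if dot else ''
-- ===== Notes on version B (the rewrite author's own statement) =====
-- stated objective: alternative
-- what changed: B drops both dict structures: the exchange code is resolved by a direct conditional classifier (returning None when unknown), and the suffix fallback no longer scans _TICKER_SUFFIX_MAP with endswith per key but rpartitions ticker.upper() on its last dot and classifies that single segment, which is equivalent because every suffix key is one leading-dot segment.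
import Mathlib
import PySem

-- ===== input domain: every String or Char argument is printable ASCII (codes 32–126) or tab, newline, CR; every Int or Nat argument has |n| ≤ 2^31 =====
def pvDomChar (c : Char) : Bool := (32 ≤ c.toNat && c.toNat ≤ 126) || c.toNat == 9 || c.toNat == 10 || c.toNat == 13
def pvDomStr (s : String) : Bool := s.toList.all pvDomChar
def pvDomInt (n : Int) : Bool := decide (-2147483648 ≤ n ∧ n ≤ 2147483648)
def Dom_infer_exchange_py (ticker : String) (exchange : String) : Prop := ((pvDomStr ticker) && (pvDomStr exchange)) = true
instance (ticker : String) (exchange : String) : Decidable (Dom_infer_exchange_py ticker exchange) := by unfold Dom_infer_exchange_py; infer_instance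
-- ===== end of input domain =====

-- B replaces A's two dicts by direct conditional classifiers and A's endswith scan by one
-- rpartition of the upper-cased ticker on its last dot; objective: alternative decomposition.

-- ===== PORT A =====
-- module constant _EXCHANGE_MAP (dict literal)
def pvExchangeMap : PySem.Dict String String := PySem.Dict.ofList [
  ("NMS", "NASDAQ"), ("NGM", "NASDAQ"), ("NCM", "NASDAQ"), ("NAS", "NASDAQ"),
  ("NYQ", "NYSE"), ("NYA", "NYSE"),
  ("PCX", "NYSE Arca"),
  ("XPAR", "Euronext Paris"), ("PAR", "Euronext Paris"), ("ENX", "Euronext Paris"),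
  ("XLON", "London SE"), ("LSE", "London SE"), ("IOB", "London SE"),
  ("XFRA", "Frankfurt"), ("FRA", "Frankfurt"), ("GER", "Frankfurt"),
  ("XAMS", "Euronext Amsterdam"), ("AMS", "Euronext Amsterdam"),
  ("XBRU", "Euronext Brussels"), ("BRU", "Euronext Brussels"),
  ("XMIL", "Borsa Italiana"), ("MIL", "Borsa Italiana"),
  ("XMAD", "BME"), ("MCE", "BME"),
  ("TDM", "TSX"), ("TSX", "TSX")]

-- module constant _TICKER_SUFFIX_MAP (dict literal)
def pvTickerSuffixMap : PySem.Dict String String := PySem.Dict.ofList [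
  (".PA", "Euronext Paris"), (".L", "London SE"), (".DE", "Frankfurt"),
  (".AS", "Euronext Amsterdam"), (".BR", "Euronext Brussels"),
  (".MI", "Borsa Italiana"), (".MC", "BME"), (".SW", "SIX Swiss"),
  (".TO", "TSX"), (".HK", "HKEX"), (".T", "Tokyo SE"),
  (".AX", "ASX"), (".CO", "Nasdaq Copenhagen")]

-- helper _normalize_exchange as A's module has it
def pvNormalizeExchangeA (ex : String) : String :=
  if ex == "" then ""
  else pvExchangeMap.getD (PySem.Str.strip (PySem.Str.upper ex)) ex

-- A's 'for sfx, exch in _TICKER_SUFFIX_MAP.items(): if ticker.upper().endswith(sfx.upper()): return exch'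
def pvScanSuffix (ticker : String) : List (String × String) → String
  | [] => ""
  | (sfx, exch) :: rest =>
      if PySem.Str.endswith (PySem.Str.upper ticker) (PySem.Str.upper sfx) then exch
      else pvScanSuffix ticker rest

def infer_exchange_py (ticker : String) (exchange : String) : String :=
  let ex := pvNormalizeExchangeA exchange
  if ex != "" then ex
  else pvScanSuffix ticker pvTickerSuffixMap.items

-- ===== PORT B =====
-- B's _exchange_full_name: a conditional classifier, None when the code is unknown
def pvExchangeFullName (code : String) : Option String :=
  if code == "NMS" || code == "NGM" || code == "NCM" || code == "NAS" then some "NASDAQ"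
  else if code == "NYQ" || code == "NYA" then some "NYSE"
  else if code == "PCX" then some "NYSE Arca"
  else if code == "XPAR" || code == "PAR" || code == "ENX" then some "Euronext Paris"
  else if code == "XLON" || code == "LSE" || code == "IOB" then some "London SE"
  else if code == "XFRA" || code == "FRA" || code == "GER" then some "Frankfurt"
  else if code == "XAMS" || code == "AMS" then some "Euronext Amsterdam"
  else if code == "XBRU" || code == "BRU" then some "Euronext Brussels"
  else if code == "XMIL" || code == "MIL" then some "Borsa Italiana"
  else if code == "XMAD" || code == "MCE" then some "BME"
  else if code == "TDM" || code == "TSX" then some "TSX"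
  else none

-- B's _suffix_exchange: classifies the last dotted segment (already upper-cased)
def pvSuffixExchange (seg : String) : String :=
  if seg == "PA" then "Euronext Paris"
  else if seg == "L" then "London SE"
  else if seg == "DE" then "Frankfurt"
  else if seg == "AS" then "Euronext Amsterdam"
  else if seg == "BR" then "Euronext Brussels"
  else if seg == "MI" then "Borsa Italiana"
  else if seg == "MC" then "BME"
  else if seg == "SW" then "SIX Swiss"
  else if seg == "TO" then "TSX"
  else if seg == "HK" then "HKEX"
  else if seg == "T" then "Tokyo SE"
  else if seg == "AX" then "ASX"
  else if seg == "CO" then "Nasdaq Copenhagen"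
  else ""

-- hand port of "_, dot, seg = cs.rpartition('.')" for the single char '.', keeping only what B
-- uses: 'some seg' (the part after the LAST '.') when a dot occurs, 'none' when dot == ''.
def pvRPartitionDotSeg (cs : List Char) : Option (List Char) :=
  if ('.' : Char) ∈ cs then some ((cs.reverse.takeWhile (fun c => c != '.')).reverse)
  else none

def infer_exchange_py_alt (ticker : String) (exchange : String) : String :=
  if exchange != "" then
    match pvExchangeFullName (PySem.Str.strip (PySem.Str.upper exchange)) with
    | some full => full
    | none => exchange
  else
    match pvRPartitionDotSeg (PySem.Str.upper ticker).toList with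
    | none => ""
    | some seg => pvSuffixExchange (String.ofList seg)

-- ===== PRECONDITION & SPEC =====
def Spec_infer_exchange_py (ticker : String) (exchange : String) (out : String) : Prop := out = infer_exchange_py_alt ticker exchange
instance (ticker : String) (exchange : String) (out : String) : Decidable (Spec_infer_exchange_py ticker exchange out) := by unfold Spec_infer_exchange_py; infer_instance

-- ===== CLAIM (what is proved, stated in full; the proofs are below) =====
def Claim_equal_infer_exchange_py : Prop := ∀ (ticker : String) (exchange : String), Dom_infer_exchange_py ticker exchange → Spec_infer_exchange_py ticker exchange (infer_exchange_py ticker exchange)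

-- ===== LEMMAS AND PROOFS =====

theorem pv_getD_eq_full (k d : String) :
    pvExchangeMap.getD k d =
      (match pvExchangeFullName k with | some v => v | none => d) := by
    by_cases e1 : k = "NMS"
    · subst e1; rfl
    by_cases e2 : k = "NGM"
    · subst e2; rfl
    by_cases e3 : k = "NCM"
    · subst e3; rfl
    by_cases e4 : k = "NAS"
    · subst e4; rfl
    by_cases e5 : k = "NYQ"
    · subst e5; rfl
    by_cases e6 : k = "NYA"
    · subst e6; rfl
    by_cases e7 : k = "PCX"
    · subst e7; rfl
    by_cases e8 : k = "XPAR"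
    · subst e8; rfl
    by_cases e9 : k = "PAR"
    · subst e9; rfl
    by_cases e10 : k = "ENX"
    · subst e10; rfl
    by_cases e11 : k = "XLON"
    · subst e11; rfl
    by_cases e12 : k = "LSE"
    · subst e12; rfl
    by_cases e13 : k = "IOB"
    · subst e13; rfl
    by_cases e14 : k = "XFRA"
    · subst e14; rfl
    by_cases e15 : k = "FRA"
    · subst e15; rfl
    by_cases e16 : k = "GER"
    · subst e16; rfl
    by_cases e17 : k = "XAMS"
    · subst e17; rfl
    by_cases e18 : k = "AMS"
    · subst e18; rfl
    by_cases e19 : k = "XBRU"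
    · subst e19; rfl
    by_cases e20 : k = "BRU"
    · subst e20; rfl
    by_cases e21 : k = "XMIL"
    · subst e21; rfl
    by_cases e22 : k = "MIL"
    · subst e22; rfl
    by_cases e23 : k = "XMAD"
    · subst e23; rfl
    by_cases e24 : k = "MCE"
    · subst e24; rfl
    by_cases e25 : k = "TDM"
    · subst e25; rfl
    by_cases e26 : k = "TSX"
    · subst e26; rfl
    have hmk : pvExchangeMap = PySem.Dict.mk [("NMS", "NASDAQ"), ("NGM", "NASDAQ"), ("NCM", "NASDAQ"), ("NAS", "NASDAQ"), ("NYQ", "NYSE"), ("NYA", "NYSE"), ("PCX", "NYSE Arca"), ("XPAR", "Euronext Paris"), ("PAR", "Euronext Paris"), ("ENX", "Euronext Paris"), ("XLON", "London SE"), ("LSE", "London SE"), ("IOB", "London SE"), ("XFRA", "Frankfurt"), ("FRA", "Frankfurt"), ("GER", "Frankfurt"), ("XAMS", "Euronext Amsterdam"), ("AMS", "Euronext Amsterdam"), ("XBRU", "Euronext Brussels"), ("BRU", "Euronext Brussels"), ("XMIL", "Borsa Italiana"), ("MIL", "Borsa Italiana"), ("XMAD", "BME"), ("MCE", "BME"),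 ("TDM", "TSX"), ("TSX", "TSX")] := by decide
    have hget : pvExchangeMap.get? k = none := by
      rw [hmk]
      simp [PySem.Dict.get?, Ne.symm e1, Ne.symm e2, Ne.symm e3, Ne.symm e4, Ne.symm e5, Ne.symm e6, Ne.symm e7, Ne.symm e8, Ne.symm e9, Ne.symm e10, Ne.symm e11, Ne.symm e12, Ne.symm e13, Ne.symm e14, Ne.symm e15, Ne.symm e16, Ne.symm e17, Ne.symm e18, Ne.symm e19, Ne.symm e20, Ne.symm e21, Ne.symm e22, Ne.symm e23, Ne.symm e24, Ne.symm e25, Ne.symm e26]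
    have hfull : pvExchangeFullName k = none := by
      simp [pvExchangeFullName, e1, e2, e3, e4, e5, e6, e7, e8, e9, e10, e11, e12, e13, e14, e15, e16, e17, e18, e19, e20, e21, e22, e23, e24, e25, e26]
    simp [PySem.Dict.getD, hget, hfull]

-- r ends the block a (dot-free) right after a '.'  ⟺  '.' occurs in r and the maximal dot-free
-- prefix of r is exactly a (stated on the reversed string).
theorem pv_prefix_dot_iff (r a : List Char) (ha : ('.' : Char) ∉ a) :
    (a ++ ['.'] <+: r) ↔ (('.' : Char) ∈ r ∧ r.takeWhile (fun c => c != '.') = a) := by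
  constructor
  · rintro ⟨rest, hr⟩
    subst hr
    constructor
    · simp
    · rw [List.append_assoc]
      rw [List.takeWhile_append_of_pos (by intro x hx; simp; rintro rfl; exact ha hx)]
      simp
  · rintro ⟨hmem, htw⟩
    have hd : r.dropWhile (fun c => c != '.') ≠ [] := by
      intro h0
      rw [List.dropWhile_eq_nil_iff] at h0
      have := h0 _ hmem
      simp at this
    have hhead := List.head_dropWhile_not (fun c => c != '.') hd
    simp at hhead
    refine ⟨(r.dropWhile (fun c => c != '.')).tail, ?_⟩
    conv_rhs => rw [← List.takeWhile_append_dropWhile (p := fun c => c != '.') (l := r)]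
    rw [htw, ← List.cons_head_tail hd, hhead, List.append_assoc]
    rfl

theorem pv_endswith_key (u b : List Char) (hb : ('.' : Char) ∉ b) :
    PySem.Chars.endswith u ('.' :: b) = (pvRPartitionDotSeg u == some b) := by
  by_cases hdot : ('.' : Char) ∈ u
  · simp only [pvRPartitionDotSeg, if_pos hdot]
    by_cases hs : (u.reverse.takeWhile (fun c => c != '.')).reverse = b
    · rw [hs]
      simp only [BEq.rfl]
      rw [PySem.Chars.endswith_iff]
      rw [show ('.' :: b) = (b.reverse ++ ['.']).reverse by simp, ← List.reverse_prefix]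
      simp only [List.reverse_reverse]
      rw [pv_prefix_dot_iff _ _ (by simpa using hb)]
      refine ⟨by simpa using hdot, ?_⟩
      rw [← hs]; simp
    · have : ¬ PySem.Chars.endswith u ('.' :: b) = true := by
        rw [PySem.Chars.endswith_iff]
        rw [show ('.' :: b) = (b.reverse ++ ['.']).reverse by simp, ← List.reverse_prefix]
        simp only [List.reverse_reverse]
        rw [pv_prefix_dot_iff _ _ (by simpa using hb)]
        rintro ⟨-, h2⟩
        exact hs (by rw [h2]; simp)
      simp only [Bool.not_eq_true] at this
      rw [this]
      simp [hs]
  · have : ¬ PySem.Chars.endswith u ('.' :: b) = true := by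
      rw [PySem.Chars.endswith_iff]
      intro h
      exact hdot (h.subset (by simp))
    simp only [Bool.not_eq_true] at this
    rw [this, pvRPartitionDotSeg, if_neg hdot]
    simp

theorem pv_ofList_beq (seg l : List Char) :
    (String.ofList seg == String.ofList l) = (seg == l) := by
  by_cases h : seg = l
  · subst h; simp
  · have h1 : String.ofList seg ≠ String.ofList l := by
      simp [String.ext_iff]; exact h
    simp [h1, h]

theorem pv_fallback_eq (t : String) :
    pvScanSuffix t pvTickerSuffixMap.items =
      (match pvRPartitionDotSeg (PySem.Str.upper t).toList with
       | none => ""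
       | some seg => pvSuffixExchange (String.ofList seg)) := by
  have hitems : pvTickerSuffixMap.items = [(".PA", "Euronext Paris"), (".L", "London SE"), (".DE", "Frankfurt"), (".AS", "Euronext Amsterdam"), (".BR", "Euronext Brussels"), (".MI", "Borsa Italiana"), (".MC", "BME"), (".SW", "SIX Swiss"), (".TO", "TSX"), (".HK", "HKEX"), (".T", "Tokyo SE"), (".AX", "ASX"), (".CO", "Nasdaq Copenhagen")] := by decide
  rw [hitems]
  simp only [pvScanSuffix]
  have h1 : PySem.Str.endswith (PySem.Str.upper t) (PySem.Str.upper ".PA") = (pvRPartitionDotSeg (PySem.Str.upper t).toList == some ['P','A']) := pv_endswith_key ((PySem.Str.upper t).toList) ['P','A'] (by decide)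
  have h2 : PySem.Str.endswith (PySem.Str.upper t) (PySem.Str.upper ".L") = (pvRPartitionDotSeg (PySem.Str.upper t).toList == some ['L']) := pv_endswith_key ((PySem.Str.upper t).toList) ['L'] (by decide)
  have h3 : PySem.Str.endswith (PySem.Str.upper t) (PySem.Str.upper ".DE") = (pvRPartitionDotSeg (PySem.Str.upper t).toList == some ['D','E']) := pv_endswith_key ((PySem.Str.upper t).toList) ['D','E'] (by decide)
  have h4 : PySem.Str.endswith (PySem.Str.upper t) (PySem.Str.upper ".AS") = (pvRPartitionDotSeg (PySem.Str.upper t).toList == some ['A','S']) := pv_endswith_key ((PySem.Str.upper t).toList) ['A','S'] (by decide)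
  have h5 : PySem.Str.endswith (PySem.Str.upper t) (PySem.Str.upper ".BR") = (pvRPartitionDotSeg (PySem.Str.upper t).toList == some ['B','R']) := pv_endswith_key ((PySem.Str.upper t).toList) ['B','R'] (by decide)
  have h6 : PySem.Str.endswith (PySem.Str.upper t) (PySem.Str.upper ".MI") = (pvRPartitionDotSeg (PySem.Str.upper t).toList == some ['M','I']) := pv_endswith_key ((PySem.Str.upper t).toList) ['M','I'] (by decide)
  have h7 : PySem.Str.endswith (PySem.Str.upper t) (PySem.Str.upper ".MC") = (pvRPartitionDotSeg (PySem.Str.upper t).toList == some ['M','C']) := pv_endswith_key ((PySem.Str.upper t).toList) ['M','C'] (by decide)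
  have h8 : PySem.Str.endswith (PySem.Str.upper t) (PySem.Str.upper ".SW") = (pvRPartitionDotSeg (PySem.Str.upper t).toList == some ['S','W']) := pv_endswith_key ((PySem.Str.upper t).toList) ['S','W'] (by decide)
  have h9 : PySem.Str.endswith (PySem.Str.upper t) (PySem.Str.upper ".TO") = (pvRPartitionDotSeg (PySem.Str.upper t).toList == some ['T','O']) := pv_endswith_key ((PySem.Str.upper t).toList) ['T','O'] (by decide)
  have h10 : PySem.Str.endswith (PySem.Str.upper t) (PySem.Str.upper ".HK") = (pvRPartitionDotSeg (PySem.Str.upper t).toList == some ['H','K']) := pv_endswith_key ((PySem.Str.upper t).toList) ['H','K'] (by decide)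
  have h11 : PySem.Str.endswith (PySem.Str.upper t) (PySem.Str.upper ".T") = (pvRPartitionDotSeg (PySem.Str.upper t).toList == some ['T']) := pv_endswith_key ((PySem.Str.upper t).toList) ['T'] (by decide)
  have h12 : PySem.Str.endswith (PySem.Str.upper t) (PySem.Str.upper ".AX") = (pvRPartitionDotSeg (PySem.Str.upper t).toList == some ['A','X']) := pv_endswith_key ((PySem.Str.upper t).toList) ['A','X'] (by decide)
  have h13 : PySem.Str.endswith (PySem.Str.upper t) (PySem.Str.upper ".CO") = (pvRPartitionDotSeg (PySem.Str.upper t).toList == some ['C','O']) := pv_endswith_key ((PySem.Str.upper t).toList) ['C','O'] (by decide)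
  rw [h1, h2, h3, h4, h5, h6, h7, h8, h9, h10, h11, h12, h13]
  cases hseg : pvRPartitionDotSeg (PySem.Str.upper t).toList with
  | none => simp
  | some seg =>
    by_cases c1 : seg = ['P','A']
    · subst c1; decide
    by_cases c2 : seg = ['L']
    · subst c2; decide
    by_cases c3 : seg = ['D','E']
    · subst c3; decide
    by_cases c4 : seg = ['A','S']
    · subst c4; decide
    by_cases c5 : seg = ['B','R']
    · subst c5; decide
    by_cases c6 : seg = ['M','I']
    · subst c6; decide
    by_cases c7 : seg = ['M','C']
    · subst c7; decide
    by_cases c8 : seg = ['S','W']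
    · subst c8; decide
    by_cases c9 : seg = ['T','O']
    · subst c9; decide
    by_cases c10 : seg = ['H','K']
    · subst c10; decide
    by_cases c11 : seg = ['T']
    · subst c11; decide
    by_cases c12 : seg = ['A','X']
    · subst c12; decide
    by_cases c13 : seg = ['C','O']
    · subst c13; decide
    have hne : ∀ l : List Char, seg ≠ l → (String.ofList seg == String.ofList l) = false := by
      intro l h
      rw [pv_ofList_beq]
      exact beq_eq_false_iff_ne.mpr h
    simp only [pvSuffixExchange,
      show ("PA":String) = String.ofList ['P','A'] from rfl,
      show ("L":String) = String.ofList ['L'] from rfl,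
      show ("DE":String) = String.ofList ['D','E'] from rfl,
      show ("AS":String) = String.ofList ['A','S'] from rfl,
      show ("BR":String) = String.ofList ['B','R'] from rfl,
      show ("MI":String) = String.ofList ['M','I'] from rfl,
      show ("MC":String) = String.ofList ['M','C'] from rfl,
      show ("SW":String) = String.ofList ['S','W'] from rfl,
      show ("TO":String) = String.ofList ['T','O'] from rfl,
      show ("HK":String) = String.ofList ['H','K'] from rfl,
      show ("T":String) = String.ofList ['T'] from rfl,
      show ("AX":String) = String.ofList ['A','X'] from rfl,
      show ("CO":String) = String.ofList ['C','O'] from rfl,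
      hne _ c1, hne _ c2, hne _ c3, hne _ c4, hne _ c5, hne _ c6, hne _ c7, hne _ c8, hne _ c9, hne _ c10, hne _ c11, hne _ c12, hne _ c13]
    simp [c1, c2, c3, c4, c5, c6, c7, c8, c9, c10, c11, c12, c13]

-- every value pvExchangeFullName can return is a non-empty exchange name
set_option maxHeartbeats 1000000 in
theorem pv_full_ne_empty (k v : String) (h : pvExchangeFullName k = some v) : v ≠ "" := by
  simp only [pvExchangeFullName] at h
  split_ifs at h
  all_goals (injection h with h; subst h; decide)

-- ===== VERDICT (by name: the statement is the Claim_ definition above) =====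
theorem infer_exchange_py_spec : Claim_equal_infer_exchange_py := by
  intro ticker exchange _
  unfold Spec_infer_exchange_py infer_exchange_py infer_exchange_py_alt
  by_cases hex : exchange = ""
  · subst hex
    simp only [pvNormalizeExchangeA, BEq.rfl, if_true, bne_self_eq_false,
      Bool.false_eq_true, if_false]
    exact pv_fallback_eq ticker
  · have hA : pvNormalizeExchangeA exchange
        = (match pvExchangeFullName (PySem.Str.strip (PySem.Str.upper exchange)) with
           | some v => v | none => exchange) := by
      rw [pvNormalizeExchangeA, if_neg (by simpa using hex), pv_getD_eq_full]
    rw [hA]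
    cases hfull : pvExchangeFullName (PySem.Str.strip (PySem.Str.upper exchange)) with
    | none => simp [hex]
    | some v =>
      have hv : v ≠ "" := pv_full_ne_empty _ _ hfull
      simp [hv, hex]
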